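-- pv_equiv track=rewrite | github.com/jilljenn/stage-python | web/_static/interfaces/interface_boites/jj.py | ia
-- ===== SOURCE A (Python) =====
-- def ia(boites):
--     n = len(boites)
--     scores = [[0] * n for _ in range(n)]
--     for k in range(n):
--         for l in range(n - k):
--             if k == 0:
--                 scores[l][l] = boites[l] if n % 2 == 1 else -boites[l]
--             elif (n - 1 - k) % 2 == 0:
--                 scores[l][l + k] = max(scores[l][l + k - 1] + boites[l + k], scores[l + 1][l + k] + boites[l])
--             else:
--                 scores[l][l + k] = min(scores[l][l + k - 1] - boites[l + k], scores[l + 1][l + k] - boites[l])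
--     if n == 1:
--         return 'G'
--     else:
--         return 'D' if scores[0][-2] + boites[-1] == scores[0][-1] else 'G'
-- ===== SOURCE B (Python) =====
-- def ia(boites):
--     n = len(boites)
--     if n == 1:
--         return 'G'
--     memo = {}
--
--     def solve(l, r):
--         if (l, r) in memo:
--             return memo[(l, r)]
--         if l == r:
--             v = boites[l] if n % 2 == 1 else -boites[l]
--         elif (n - 1 - (r - l)) % 2 == 0:
--             v = max(solve(l, r - 1) + boites[r], solve(l + 1, r) + boites[l])
--         else:
--             v = min(solve(l, r - 1) - boites[r], solve(l + 1, r) - boites[l])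
--         memo[(l, r)] = v
--         return v
--
--     return 'D' if solve(0, n - 2) + boites[-1] == solve(0, n - 1) else 'G'
-- ===== Notes on version B (the rewrite author's own statement) =====
-- stated objective: alternative
-- what changed: Replaces A's bottom-up nested-loop table fill over all diagonals with a top-down recursion over intervals memoized in a dict keyed by (l, r), so only the intervals actually reachable from the two top queries are computed, in recursion order instead of diagonal order.
import Mathlib
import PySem

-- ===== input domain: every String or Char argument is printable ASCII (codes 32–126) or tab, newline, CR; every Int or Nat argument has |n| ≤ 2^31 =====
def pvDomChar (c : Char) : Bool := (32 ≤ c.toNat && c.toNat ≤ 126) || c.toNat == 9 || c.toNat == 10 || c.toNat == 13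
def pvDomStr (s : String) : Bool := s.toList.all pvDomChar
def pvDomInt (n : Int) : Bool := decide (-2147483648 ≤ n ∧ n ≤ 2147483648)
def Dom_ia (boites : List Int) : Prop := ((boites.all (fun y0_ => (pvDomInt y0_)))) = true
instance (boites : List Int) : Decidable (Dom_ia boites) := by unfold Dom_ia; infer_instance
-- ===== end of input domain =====

-- B replaces A's bottom-up table fill over all diagonals by a top-down memoized recursion
-- over intervals (dict keyed by (l, r)); same return value, same asymptotic cost.

-- ===== PORT A =====
-- xs[i] read: on every input admitted by Pre_ia the indices A uses are in range, so the
-- default of pyGetD is never returned.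
def iaGet (xs : List Int) (i : Int) : Int := PySem.List.pyGetD xs i 0
-- scores[l][j] read / write (indices in range wherever A executes them)
def iaGet2 (m : List (List Int)) (i j : Int) : Int := PySem.List.pyGetD (PySem.List.pyGetD m i []) j 0
def iaSet2 (m : List (List Int)) (i j : Int) (v : Int) : List (List Int) :=
  PySem.List.pySetD m i (PySem.List.pySetD (PySem.List.pyGetD m i []) j v)

-- body of the inner 'for l in range(n - k)' loop of A
def iaInner (boites : List Int) (n k : Int) (scores : List (List Int)) (l : Int) : List (List Int) :=
  if k = 0 then
    iaSet2 scores l l (if PySem.Int.mod n 2 = 1 then iaGet boites l else -(iaGet boites l))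
  else if PySem.Int.mod (n - 1 - k) 2 = 0 then
    iaSet2 scores l (l + k)
      (max (iaGet2 scores l (l + k - 1) + iaGet boites (l + k)) (iaGet2 scores (l + 1) (l + k) + iaGet boites l))
  else
    iaSet2 scores l (l + k)
      (min (iaGet2 scores l (l + k - 1) - iaGet boites (l + k)) (iaGet2 scores (l + 1) (l + k) - iaGet boites l))

-- body of the outer 'for k in range(n)' loop of A
def iaOuter (boites : List Int) (n : Int) (scores : List (List Int)) (k : Int) : List (List Int) :=
  (PySem.List.pyRange 0 (n - k) 1).foldl (iaInner boites n k) scores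

def ia (boites : List Int) : String :=
  let n : Int := PySem.List.len boites
  let scores : List (List Int) := List.replicate n.toNat (List.replicate n.toNat (0 : Int))
  let scores := (PySem.List.pyRange 0 n 1).foldl (iaOuter boites n) scores
  if n = 1 then "G"
  else if iaGet2 scores 0 (-2) + iaGet boites (-1) = iaGet2 scores 0 (-1) then "D" else "G"

-- ===== PORT B =====
-- B's 'solve(l, r)' with its memo dict threaded through; 'fuel' only makes the recursion
-- total (on every input admitted by Pre_ia the fuel given below is never exhausted).
def solveB (boites : List Int) (n : Int) :
    Nat → Int → Int → PySem.Dict (Int × Int) Int → Int × PySem.Dict (Int × Int) Int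
  | 0, _, _, memo => (0, memo)
  | fuel + 1, l, r, memo =>
    match PySem.Dict.get? memo (l, r) with
    | some v => (v, memo)
    | none =>
      if l = r then
        let v := if PySem.Int.mod n 2 = 1 then iaGet boites l else -(iaGet boites l)
        (v, PySem.Dict.insert memo (l, r) v)
      else if PySem.Int.mod (n - 1 - (r - l)) 2 = 0 then
        let p1 := solveB boites n fuel l (r - 1) memo
        let p2 := solveB boites n fuel (l + 1) r p1.2
        let v := max (p1.1 + iaGet boites r) (p2.1 + iaGet boites l)
        (v, PySem.Dict.insert p2.2 (l, r) v)
      else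
        let p1 := solveB boites n fuel l (r - 1) memo
        let p2 := solveB boites n fuel (l + 1) r p1.2
        let v := min (p1.1 - iaGet boites r) (p2.1 - iaGet boites l)
        (v, PySem.Dict.insert p2.2 (l, r) v)

def ia_alt (boites : List Int) : String :=
  let n : Int := PySem.List.len boites
  if n = 1 then "G"
  else
    let p1 := solveB boites n (n.toNat + 1) 0 (n - 2) PySem.Dict.empty
    let p2 := solveB boites n (n.toNat + 1) 0 (n - 1) p1.2
    if p1.1 + iaGet boites (-1) = p2.1 then "D" else "G"

-- ===== PRECONDITION & SPEC =====
-- A raises IndexError on the empty list (scores[0][-2] of an empty table); excluded.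
def Pre_ia (boites : List Int) : Prop := boites ≠ []
instance (boites : List Int) : Decidable (Pre_ia boites) := by unfold Pre_ia; infer_instance
def pvWitness_ia : List Int := ([3, -1, 4])

def Spec_ia (boites : List Int) (out : String) : Prop := out = ia_alt boites
instance (boites : List Int) (out : String) : Decidable (Spec_ia boites out) := by unfold Spec_ia; infer_instance

-- ===== CLAIM (what is proved, stated in full; the proofs are below) =====
def Claim_equal_ia : Prop := ∀ (boites : List Int), Dom_ia boites → Pre_ia boites → Spec_ia boites (ia boites)


-- ===== LEMMAS AND PROOFS =====

-- the interval game value: iaS boites n g l = scores[l][l+g] of A (g = interval gap)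
def iaS (boites : List Int) (n : Int) : Nat → Int → Int
  | 0, l => if PySem.Int.mod n 2 = 1 then iaGet boites l else -(iaGet boites l)
  | g + 1, l =>
    if PySem.Int.mod (n - 1 - ((g : Int) + 1)) 2 = 0 then
      max (iaS boites n g l + iaGet boites (l + ((g : Int) + 1))) (iaS boites n g (l + 1) + iaGet boites l)
    else
      min (iaS boites n g l - iaGet boites (l + ((g : Int) + 1))) (iaS boites n g (l + 1) - iaGet boites l)

-- Nat-indexed table access (what iaGet2/iaSet2 become on nonnegative in-range indices)
def tget (m : List (List Int)) (l j : Nat) : Int := (m.getD l []).getD j 0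
def tset (m : List (List Int)) (l j : Nat) (v : Int) : List (List Int) :=
  m.set l ((m.getD l []).set j v)

def Shaped (m : List (List Int)) (N : Nat) : Prop :=
  m.length = N ∧ ∀ row ∈ m, row.length = N

lemma iaGet2_natCast (m : List (List Int)) (i j : Nat) : iaGet2 m (i : Int) (j : Int) = tget m i j := by
  simp [iaGet2, tget]

lemma iaSet2_natCast (m : List (List Int)) (i j : Nat) (v : Int) :
    iaSet2 m (i : Int) (j : Int) v = tset m i j v := by
  simp [iaSet2, tset]

lemma shaped_tset {m : List (List Int)} {N l j : Nat} (h : Shaped m N) (hl : l < N) (v : Int) :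
    Shaped (tset m l j v) N := by
  obtain ⟨h1, h2⟩ := h
  refine ⟨by simp [tset, h1], ?_⟩
  intro row hrow
  rcases List.mem_or_eq_of_mem_set hrow with h | h
  · exact h2 row h
  · subst h
    rw [List.length_set]
    exact h2 _ (by rw [List.getD_eq_getElem m [] (by omega)]; exact List.getElem_mem _)

lemma tget_tset {m : List (List Int)} {N : Nat} (h : Shaped m N) {l j : Nat}
    (hl : l < N) (hj : j < N) (v : Int) (l' j' : Nat) :
    tget (tset m l j v) l' j' = if l' = l ∧ j' = j then v else tget m l' j' := by
  obtain ⟨h1, h2⟩ := h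
  have hml : l < m.length := by omega
  have hrow : m.getD l [] = m[l] := List.getD_eq_getElem m [] hml
  have hlen : (m.getD l []).length = N := by rw [hrow]; exact h2 _ (List.getElem_mem _)
  have hlen' : (m[l]?.getD []).length = N := by
    rw [← List.getD_eq_getElem?_getD]; exact hlen
  simp only [tget, tset, List.getD_eq_getElem?_getD, List.getElem?_set]
  by_cases he : l = l'
  · subst he
    simp only [if_pos hml]
    by_cases hj' : j = j'
    · subst hj'
      have hjl : j < (m[l]?.getD []).length := by omega
      simp [hjl]
    · have hj'' : ¬ (j' = j) := fun hc => hj' hc.symm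
      simp [hj', hj'']
  · have he' : ¬ (l' = l) := fun hc => he hc.symm
    rw [if_neg he, if_neg (by tauto)]

-- table correctness through round K: every gap-g cell with g < K holds the game value
def TabOK (boites : List Int) (m : List (List Int)) (K : Nat) : Prop :=
  Shaped m boites.length ∧
  ∀ g l : Nat, g < K → l + g < boites.length →
    tget m l (l + g) = iaS boites (boites.length : Int) g (l : Int)

-- round 0 of A's outer loop: the first L iterations fill the diagonal cells (l, l)
lemma innerRound0 (boites : List Int) (m : List (List Int)) (L : Nat)
    (hL : L ≤ boites.length) (hm : Shaped m boites.length) :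
    Shaped ((PySem.List.pyRange 0 (L : Int) 1).foldl (iaInner boites (boites.length : Int) 0) m) boites.length ∧
    ∀ l' j' : Nat,
      tget ((PySem.List.pyRange 0 (L : Int) 1).foldl (iaInner boites (boites.length : Int) 0) m) l' j' =
        if l' < L ∧ j' = l' then iaS boites (boites.length : Int) 0 (l' : Int) else tget m l' j' := by
  induction L with
  | zero =>
    rw [show ((0 : Nat) : Int) = 0 from rfl, PySem.List.pyRange_one_eq_nil le_rfl]
    exact ⟨hm, fun l' j' => by simp⟩
  | succ L ih =>
    obtain ⟨ih1, ih2⟩ := ih (by omega)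
    have hsplit : PySem.List.pyRange 0 ((L + 1 : Nat) : Int) 1 =
        PySem.List.pyRange 0 (L : Int) 1 ++ [(L : Int)] := by
      push_cast
      exact PySem.List.pyRange_one_succ_right (by omega)
    rw [hsplit, List.foldl_append]
    set m' := (PySem.List.pyRange 0 (L : Int) 1).foldl (iaInner boites (boites.length : Int) 0) m with hm'
    have hstep : List.foldl (iaInner boites (boites.length : Int) 0) m' [(L : Int)] =
        tset m' L L (iaS boites (boites.length : Int) 0 (L : Int)) := by
      have hv : (if PySem.Int.mod ((boites.length : Int)) 2 = 1 then iaGet boites (L : Int)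
          else -(iaGet boites (L : Int))) = iaS boites (boites.length : Int) 0 (L : Int) := by
        simp [iaS]
      have hone : iaInner boites (boites.length : Int) 0 m' (L : Int) =
          tset m' L L (iaS boites (boites.length : Int) 0 (L : Int)) := by
        unfold iaInner
        rw [if_pos rfl, hv, iaSet2_natCast]
      simp only [List.foldl_cons, List.foldl_nil, hone]
    rw [hstep]
    refine ⟨shaped_tset ih1 (by omega) _, ?_⟩
    intro l' j'
    rw [tget_tset ih1 (by omega) (by omega), ih2]
    by_cases h1 : l' = L ∧ j' = L
    · obtain ⟨rfl, rfl⟩ := h1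
      rw [if_pos ⟨rfl, rfl⟩, if_pos ⟨by omega, rfl⟩]
    · rw [if_neg h1]
      by_cases h2 : l' < L + 1 ∧ j' = l'
      · rw [if_pos h2, if_pos ⟨by omega, h2.2⟩]
      · rw [if_neg h2, if_neg (by omega)]

-- round K ≥ 1: the first L iterations fill the gap-K cells (l, l + K)
lemma innerRoundK (boites : List Int) (K : Nat) (hK : 1 ≤ K) (hKN : K < boites.length)
    (m : List (List Int)) (hm : TabOK boites m K) (L : Nat) (hL : L ≤ boites.length - K) :
    Shaped ((PySem.List.pyRange 0 (L : Int) 1).foldl (iaInner boites (boites.length : Int) (K : Int)) m) boites.length ∧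
    ∀ l' j' : Nat,
      tget ((PySem.List.pyRange 0 (L : Int) 1).foldl (iaInner boites (boites.length : Int) (K : Int)) m) l' j' =
        if l' < L ∧ j' = l' + K then iaS boites (boites.length : Int) K (l' : Int) else tget m l' j' := by
  obtain ⟨hsh, hval⟩ := hm
  induction L with
  | zero =>
    rw [show ((0 : Nat) : Int) = 0 from rfl, PySem.List.pyRange_one_eq_nil le_rfl]
    exact ⟨hsh, fun l' j' => by simp⟩
  | succ L ih =>
    obtain ⟨ih1, ih2⟩ := ih (by omega)
    have hsplit : PySem.List.pyRange 0 ((L + 1 : Nat) : Int) 1 =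
        PySem.List.pyRange 0 (L : Int) 1 ++ [(L : Int)] := by
      push_cast
      exact PySem.List.pyRange_one_succ_right (by omega)
    rw [hsplit, List.foldl_append]
    set m' := (PySem.List.pyRange 0 (L : Int) 1).foldl (iaInner boites (boites.length : Int) (K : Int)) m with hm'
    -- the two cells the step reads are gap-(K-1) cells, already correct and untouched
    have hread1 : iaGet2 m' (L : Int) ((L : Int) + (K : Int) - 1) =
        iaS boites (boites.length : Int) (K - 1) (L : Int) := by
      have hcast : (L : Int) + (K : Int) - 1 = ((L + (K - 1) : Nat) : Int) := by push_cast; omega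
      rw [hcast, iaGet2_natCast, ih2, if_neg (by omega : ¬ (L < L ∧ L + (K - 1) = L + K)),
        hval (K - 1) L (by omega) (by omega)]
    have hread2 : iaGet2 m' ((L : Int) + 1) ((L : Int) + (K : Int)) =
        iaS boites (boites.length : Int) (K - 1) ((L : Int) + 1) := by
      have hc1 : (L : Int) + 1 = ((L + 1 : Nat) : Int) := by push_cast; ring
      have hc2 : (L : Int) + (K : Int) = (((L + 1) + (K - 1) : Nat) : Int) := by push_cast; omega
      rw [hc1, hc2, iaGet2_natCast, ih2,
        if_neg (by omega : ¬ (L + 1 < L ∧ (L + 1) + (K - 1) = (L + 1) + K)),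
        hval (K - 1) (L + 1) (by omega) (by omega)]
    have hiaS : iaS boites (boites.length : Int) K (L : Int) =
        if PySem.Int.mod ((boites.length : Int) - 1 - (K : Int)) 2 = 0 then
          max (iaS boites (boites.length : Int) (K - 1) (L : Int) + iaGet boites ((L : Int) + (K : Int)))
              (iaS boites (boites.length : Int) (K - 1) ((L : Int) + 1) + iaGet boites (L : Int))
        else
          min (iaS boites (boites.length : Int) (K - 1) (L : Int) - iaGet boites ((L : Int) + (K : Int)))
              (iaS boites (boites.length : Int) (K - 1) ((L : Int) + 1) - iaGet boites (L : Int)) := by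
      obtain ⟨K', rfl⟩ : ∃ K', K = K' + 1 := ⟨K - 1, by omega⟩
      rw [iaS]
      have hc : ((K' : Int) + 1) = ((K' + 1 : Nat) : Int) := by push_cast; ring
      simp only [hc, Nat.add_sub_cancel]
    have hstep : List.foldl (iaInner boites (boites.length : Int) (K : Int)) m' [(L : Int)] =
        tset m' L (L + K) (iaS boites (boites.length : Int) K (L : Int)) := by
      simp only [List.foldl_cons, List.foldl_nil, iaInner]
      rw [if_neg (by omega : ¬ (K : Int) = 0), hread1, hread2, hiaS]
      have hc : (L : Int) + (K : Int) = ((L + K : Nat) : Int) := by push_cast; ring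
      by_cases hpar : PySem.Int.mod ((boites.length : Int) - 1 - (K : Int)) 2 = 0
      · rw [if_pos hpar, if_pos hpar, hc, iaSet2_natCast]
      · rw [if_neg hpar, if_neg hpar, hc, iaSet2_natCast]
    rw [hstep]
    refine ⟨shaped_tset ih1 (by omega) _, ?_⟩
    intro l' j'
    rw [tget_tset ih1 (by omega) (by omega), ih2]
    by_cases h1 : l' = L ∧ j' = L + K
    · obtain ⟨rfl, rfl⟩ := h1
      rw [if_pos ⟨rfl, rfl⟩, if_pos ⟨by omega, rfl⟩]
    · rw [if_neg h1]
      by_cases h2 : l' < L + 1 ∧ j' = l' + K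
      · rw [if_pos h2, if_pos ⟨by omega, h2.2⟩]
      · rw [if_neg h2, if_neg (by omega)]

-- the first K rounds of A's outer loop establish TabOK · K
lemma outerRounds (boites : List Int) (K : Nat) (hK : K ≤ boites.length) :
    TabOK boites
      ((PySem.List.pyRange 0 (K : Int) 1).foldl (iaOuter boites (boites.length : Int))
        (List.replicate boites.length (List.replicate boites.length (0 : Int)))) K := by
  induction K with
  | zero =>
    rw [show ((0 : Nat) : Int) = 0 from rfl, PySem.List.pyRange_one_eq_nil le_rfl]
    refine ⟨⟨by simp, ?_⟩, by omega⟩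
    intro row hrow
    simp [List.eq_of_mem_replicate hrow]
  | succ K ih =>
    obtain ⟨ih1, ih2⟩ := ih (by omega)
    have hsplit : PySem.List.pyRange 0 ((K + 1 : Nat) : Int) 1 =
        PySem.List.pyRange 0 (K : Int) 1 ++ [(K : Int)] := by
      push_cast
      exact PySem.List.pyRange_one_succ_right (by omega)
    rw [hsplit, List.foldl_append]
    set m := (PySem.List.pyRange 0 (K : Int) 1).foldl (iaOuter boites (boites.length : Int))
      (List.replicate boites.length (List.replicate boites.length (0 : Int))) with hmdef
    simp only [List.foldl_cons, List.foldl_nil, iaOuter]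
    rw [show ((boites.length : Int) - (K : Int)) = ((boites.length - K : Nat) : Int) by omega]
    by_cases hK0 : K = 0
    · subst hK0
      rw [Nat.sub_zero, Nat.cast_zero]
      obtain ⟨hsh', hv'⟩ := innerRound0 boites m boites.length le_rfl ih1
      refine ⟨hsh', ?_⟩
      intro g l hg hl
      rw [hv' l (l + g), if_pos ⟨by omega, by omega⟩, show g = 0 by omega]
    · have hKN : K < boites.length := by omega
      obtain ⟨hsh', hv'⟩ := innerRoundK boites K (by omega) hKN m ⟨ih1, ih2⟩ (boites.length - K) le_rfl
      refine ⟨hsh', ?_⟩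
      intro g l hg hl
      rw [hv' l (l + g)]
      by_cases hgK : g = K
      · rw [if_pos ⟨by omega, by omega⟩, hgK]
      · rw [if_neg (by omega), ih2 g l (by omega) hl]

-- ===== B side: the memoized recursion computes iaS =====

-- every entry of the memo is a correct interval value
def GoodMemo (boites : List Int) (memo : PySem.Dict (Int × Int) Int) : Prop :=
  ∀ l r v : Int, PySem.Dict.get? memo (l, r) = some v →
    0 ≤ r - l ∧ v = iaS boites (boites.length : Int) (r - l).toNat l

lemma goodMemo_empty (boites : List Int) : GoodMemo boites PySem.Dict.empty := by
  intro l r v h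
  simp [PySem.Dict.get?_empty] at h

lemma goodMemo_insert {boites : List Int} {memo : PySem.Dict (Int × Int) Int}
    (hm : GoodMemo boites memo) {l r : Int} (hlr : 0 ≤ r - l) :
    GoodMemo boites (PySem.Dict.insert memo (l, r) (iaS boites (boites.length : Int) (r - l).toNat l)) := by
  intro l' r' v h
  rw [PySem.Dict.get?_insert] at h
  by_cases hk : (l', r') = (l, r)
  · rw [if_pos hk] at h
    obtain ⟨rfl, rfl⟩ := Prod.mk.injEq .. ▸ Prod.ext_iff.mp hk
    exact ⟨hlr, (Option.some_injective _ h).symm⟩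
  · rw [if_neg hk] at h
    exact hm l' r' v h

lemma solveB_correct (boites : List Int) :
    ∀ (fuel : Nat) (l r : Int) (memo : PySem.Dict (Int × Int) Int),
      GoodMemo boites memo → 0 ≤ r - l → (r - l).toNat < fuel →
      (solveB boites (boites.length : Int) fuel l r memo).1 =
          iaS boites (boites.length : Int) (r - l).toNat l ∧
        GoodMemo boites (solveB boites (boites.length : Int) fuel l r memo).2 := by
  intro fuel
  induction fuel with
  | zero => intro l r memo _ _ hf; omega
  | succ fuel ih =>
    intro l r memo hm hlr hf
    rw [solveB]
    cases hhit : PySem.Dict.get? memo (l, r) with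
    | some v =>
      simpa using ⟨(hm l r v hhit).2, hm⟩
    | none =>
      simp only
      by_cases heq : l = r
      · subst heq
        rw [if_pos rfl]
        have h0 : (l - l).toNat = 0 := by omega
        constructor
        · simp [iaS]
        · have := goodMemo_insert hm (l := l) (r := l) (by omega)
          simpa [h0, iaS] using this
      · rw [if_neg heq]
        have hlt : l < r := by omega
        obtain ⟨g, hg⟩ : ∃ g : Nat, r - l = (g : Int) + 1 :=
          ⟨(r - l).toNat - 1, by omega⟩
        have hg1 : (r - 1 - l).toNat = g := by omega
        have hg2 : (r - (l + 1)).toNat = g := by omega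
        have hgt : (r - l).toNat = g + 1 := by omega
        have h1 := ih l (r - 1) memo hm (by omega) (by omega)
        have h2 := ih (l + 1) r _ h1.2 (by omega) (by omega)
        have hins := goodMemo_insert h2.2 (l := l) (r := r) (by omega)
        rw [hg1] at h1
        rw [hg2] at h2
        have hvS : iaS boites (boites.length : Int) (r - l).toNat l =
            if PySem.Int.mod ((boites.length : Int) - 1 - (r - l)) 2 = 0 then
              max ((solveB boites (boites.length : Int) fuel l (r - 1) memo).1 + iaGet boites r)
                  ((solveB boites (boites.length : Int) fuel (l + 1) r
                      (solveB boites (boites.length : Int) fuel l (r - 1) memo).2).1 + iaGet boites l)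
            else
              min ((solveB boites (boites.length : Int) fuel l (r - 1) memo).1 - iaGet boites r)
                  ((solveB boites (boites.length : Int) fuel (l + 1) r
                      (solveB boites (boites.length : Int) fuel l (r - 1) memo).2).1 - iaGet boites l) := by
          rw [hgt, iaS, h1.1, h2.1, show (g : Int) + 1 = r - l by omega,
            show l + (r - l) = r by ring]
        by_cases hpar : PySem.Int.mod ((boites.length : Int) - 1 - (r - l)) 2 = 0
        · rw [if_pos hpar]
          rw [if_pos hpar] at hvS
          exact ⟨hvS.symm, by rw [← hvS]; exact hins⟩
        · rw [if_neg hpar]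
          rw [if_neg hpar] at hvS
          exact ⟨hvS.symm, by rw [← hvS]; exact hins⟩

-- ===== final assembly =====

lemma ia_eq_alt (boites : List Int) (hpre : boites ≠ []) : ia boites = ia_alt boites := by
  have hN0 : 1 ≤ boites.length := List.length_pos_iff.mpr hpre
  by_cases hN1 : boites.length = 1
  · simp [ia, ia_alt, hN1]
  · have h2 : 2 ≤ boites.length := by omega
    have hn1 : ¬ ((boites.length : Int) = 1) := by omega
    simp only [ia, ia_alt, PySem.List.len_eq, Int.toNat_natCast]
    rw [if_neg hn1, if_neg hn1]
    -- A side: the finished table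
    obtain ⟨⟨hTlen, hTrows⟩, hvals⟩ := outerRounds boites boites.length le_rfl
    set T := (PySem.List.pyRange 0 ((boites.length : Nat) : Int) 1).foldl
      (iaOuter boites (boites.length : Int))
      (List.replicate boites.length (List.replicate boites.length (0 : Int))) with hT
    have hrowlen : (T.getD 0 []).length = boites.length := by
      apply hTrows
      rw [List.getD_eq_getElem T [] (by omega)]
      exact List.getElem_mem _
    have hA2 : iaGet2 T 0 (-2) = iaS boites (boites.length : Int) (boites.length - 2) 0 := by
      unfold iaGet2
      rw [PySem.List.pyGetD_zero T [],
        PySem.List.pyGetD_neg_ofNat (T.getD 0 []) 2 0 (by omega) (by omega)]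
      simp only [hrowlen]
      have := hvals (boites.length - 2) 0 (by omega) (by omega)
      rw [tget, List.getD_eq_getElem _ 0 (by omega)] at this
      simpa using this
    have hA1 : iaGet2 T 0 (-1) = iaS boites (boites.length : Int) (boites.length - 1) 0 := by
      unfold iaGet2
      rw [PySem.List.pyGetD_zero T [],
        PySem.List.pyGetD_neg_ofNat (T.getD 0 []) 1 0 (by omega) (by omega)]
      simp only [hrowlen]
      have := hvals (boites.length - 1) 0 (by omega) (by omega)
      rw [tget, List.getD_eq_getElem _ 0 (by omega)] at this
      simpa using this
    -- B side: the two memoized queries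
    have hq1 := solveB_correct boites (boites.length + 1) 0 ((boites.length : Int) - 2)
      PySem.Dict.empty (goodMemo_empty boites) (by omega) (by omega)
    have hq2 := solveB_correct boites (boites.length + 1) 0 ((boites.length : Int) - 1)
      _ hq1.2 (by omega) (by omega)
    rw [show (((boites.length : Int) - 2) - 0).toNat = boites.length - 2 by omega] at hq1
    rw [show (((boites.length : Int) - 1) - 0).toNat = boites.length - 1 by omega] at hq2
    simp only [← hT, hA2, hA1, hq1.1, hq2.1]
-- ===== VERDICT (by name: the statement is the Claim_ definition above) =====
theorem ia_spec : Claim_equal_ia := by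
  unfold Claim_equal_ia
  intro boites _ hpre
  unfold Spec_ia
  exact ia_eq_alt boites hpre
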